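-- pv_equiv track=rewrite | github.com/weihe13/Lee_code | Amazon/amazon.py | maxAZ
-- ===== SOURCE A (Python) =====
-- def maxAZ(string):
--     add_A = 'A' + string
--     add_Z = string + 'Z'
--     count_A = 0
--     count_Z = 0
--
--     temp = 0
--
--     for i in range(len(add_A)):
--         if add_A[i] == 'Z':
--             count_A += temp
--         if add_A[i] == "A":
--             temp += 1
--
--     temp_ = 0
--     for i in range(len(add_Z)):
--         if add_Z[i] == 'Z':
--             count_Z += temp_
--         if add_Z[i] == "A":
--             temp_ += 1
--     return max(count_A, count_Z)
-- ===== SOURCE B (Python) =====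
-- def maxAZ(string):
--     pairs = 0
--     numA = 0
--     numZ = 0
--     for ch in string:
--         if ch == 'Z':
--             pairs += numA
--             numZ += 1
--         elif ch == 'A':
--             numA += 1
--     return pairs + max(numA, numZ)
-- ===== Notes on version B (the rewrite author's own statement) =====
-- stated objective: faster
-- what changed: B replaces A's two string constructions ('A'+s and s+'Z') and two scanning loops by a single pass that keeps pairs/numA/numZ and returns pairs + max(numA, numZ), using the identities count_A = pairs + numZ and count_Z = pairs + numA.
import Mathlib
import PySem

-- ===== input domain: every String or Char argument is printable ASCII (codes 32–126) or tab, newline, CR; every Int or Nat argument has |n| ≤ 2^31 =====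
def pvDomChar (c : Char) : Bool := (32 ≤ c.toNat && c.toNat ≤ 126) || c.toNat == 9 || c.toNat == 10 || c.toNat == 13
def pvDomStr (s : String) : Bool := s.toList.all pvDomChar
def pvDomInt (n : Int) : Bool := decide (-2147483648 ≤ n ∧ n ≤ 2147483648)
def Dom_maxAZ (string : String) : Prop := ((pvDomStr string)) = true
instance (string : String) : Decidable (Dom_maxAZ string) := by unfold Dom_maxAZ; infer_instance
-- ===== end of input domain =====

-- B is one pass over the string with no string copies (pairs + max(numA,numZ)); A builds two strings and scans each.

-- ===== PORT A =====
-- A's loop 'for i in range(len(l)): if l[i]=='Z': count+=temp; if l[i]=='A': temp+=1'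
-- transcribed as structural recursion over the same characters with state (count, temp).
def maxAZ_loop : List Char → Int → Int → Int × Int
  | [], c, t => (c, t)
  | x :: xs, c, t =>
      maxAZ_loop xs (if x = 'Z' then c + t else c) (if x = 'A' then t + 1 else t)

def maxAZ (string : String) : Int :=
  let add_A := 'A' :: string.toList
  let add_Z := string.toList ++ ['Z']
  let count_A := (maxAZ_loop add_A 0 0).1
  let count_Z := (maxAZ_loop add_Z 0 0).1
  max count_A count_Z

-- ===== PORT B =====
-- B's single loop with state (pairs, numA, numZ).
def maxAZ_alt_loop : List Char → Int → Int → Int → Int × Int × Int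
  | [], p, a, z => (p, a, z)
  | ch :: xs, p, a, z =>
      if ch = 'Z' then maxAZ_alt_loop xs (p + a) a (z + 1)
      else if ch = 'A' then maxAZ_alt_loop xs p (a + 1) z
      else maxAZ_alt_loop xs p a z

def maxAZ_alt (string : String) : Int :=
  let r := maxAZ_alt_loop string.toList 0 0 0
  r.1 + max r.2.1 r.2.2

-- ===== PRECONDITION & SPEC =====
def Spec_maxAZ (string : String) (out : Int) : Prop := out = maxAZ_alt string
instance (string : String) (out : Int) : Decidable (Spec_maxAZ string out) := by unfold Spec_maxAZ; infer_instance

-- ===== CLAIM (what is proved, stated in full; the proofs are below) =====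
def Claim_equal_maxAZ : Prop := ∀ (string : String), Dom_maxAZ string → Spec_maxAZ string (maxAZ string)

-- ===== LEMMAS AND PROOFS =====

-- number of 'A's / 'Z's in a list, and the AZ-pair count P (pairs i<j with l[i]='A', l[j]='Z')
def pvCntA : List Char → Int
  | [] => 0
  | x :: xs => (if x = 'A' then 1 else 0) + pvCntA xs

def pvCntZ : List Char → Int
  | [] => 0
  | x :: xs => (if x = 'Z' then 1 else 0) + pvCntZ xs

def pvP : List Char → Int
  | [] => 0
  | x :: xs => (if x = 'A' then pvCntZ xs else 0) + pvP xs

theorem maxAZ_loop_spec (l : List Char) : ∀ c t : Int,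
    maxAZ_loop l c t = (c + t * pvCntZ l + pvP l, t + pvCntA l) := by
  induction l with
  | nil => intro c t; simp [maxAZ_loop, pvCntZ, pvCntA, pvP]
  | cons x xs ih =>
      intro c t
      simp only [maxAZ_loop, pvCntZ, pvCntA, pvP, ih, Prod.mk.injEq]
      by_cases hz : x = 'Z' <;> by_cases ha : x = 'A' <;>
        simp only [hz, ha, if_pos, Char.reduceEq, if_false] <;>
        constructor <;> ring

theorem maxAZ_alt_loop_spec (l : List Char) : ∀ p a z : Int,
    maxAZ_alt_loop l p a z = (p + a * pvCntZ l + pvP l, a + pvCntA l, z + pvCntZ l) := by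
  induction l with
  | nil => intro p a z; simp [maxAZ_alt_loop, pvCntZ, pvCntA, pvP]
  | cons x xs ih =>
      intro p a z
      simp only [maxAZ_alt_loop]
      by_cases hz : x = 'Z' <;> by_cases ha : x = 'A' <;>
        simp only [hz, ha, Char.reduceEq, if_pos, if_neg,
          not_false_eq_true, ih, pvCntZ, pvCntA, pvP, Prod.mk.injEq] <;>
        refine ⟨by ring, by ring, by ring⟩

theorem pvCntZ_append_Z (l : List Char) : pvCntZ (l ++ ['Z']) = pvCntZ l + 1 := by
  induction l with
  | nil => simp [pvCntZ]
  | cons y ys ih => simp only [List.cons_append, pvCntZ, ih]; ring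

theorem pvP_append_Z (l : List Char) : pvP (l ++ ['Z']) = pvP l + pvCntA l := by
  induction l with
  | nil => simp [pvP, pvCntA]
  | cons x xs ih =>
      simp only [List.cons_append, pvP, pvCntA, ih, pvCntZ_append_Z]
      split_ifs <;> ring

-- ===== VERDICT (by name: the statement is the Claim_ definition above) =====
theorem maxAZ_spec : Claim_equal_maxAZ := by
  intro s _
  unfold Spec_maxAZ maxAZ maxAZ_alt
  simp only [maxAZ_loop_spec, maxAZ_alt_loop_spec, pvP_append_Z]
  have h : pvP ('A' :: s.toList) = pvCntZ s.toList + pvP s.toList := by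
    simp [pvP]
  simp only [h, pvCntZ]
  rcases le_total (pvCntA s.toList) (pvCntZ s.toList) with hle | hle <;>
    simp [max_def] <;> split_ifs <;> omega
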